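-- pv_equiv track=rewrite | github.com/calixdave/updated_senior_sensing_spring_2026 | mapingfromtxtfile.py | compact_pairs_to_local_grids
-- ===== SOURCE A (Python) =====
-- def compact_pairs_to_local_grids(pairs):
--     """
--     Rebuild local 3x3 color and object matrices.
--
--     Compact order from runner:
--         top-left, top-middle, top-right,
--         middle-left, middle-right,
--         bottom-left, bottom-middle, bottom-right
--
--     Center is inserted as A.
--     """
--
--     color = [
--         ["?", "?", "?"],
--         ["?", "A", "?"],
--         ["?", "?", "?"],
--     ]
--
--     obj = [
--         ["?", "?", "?"],
--         ["?", "A", "?"],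
--         ["?", "?", "?"],
--     ]
--
--     positions = [
--         (0, 0), (0, 1), (0, 2),
--         (1, 0),         (1, 2),
--         (2, 0), (2, 1), (2, 2),
--     ]
--
--     for (r, c), (color_char, object_char) in zip(positions, pairs):
--         color[r][c] = color_char
--         obj[r][c] = object_char
--
--     return color, obj
-- ===== SOURCE B (Python) =====
-- def compact_pairs_to_local_grids(pairs):
--     # Pad the first 8 pairs to length 8, splice the center ("A","A") in at
--     # index 4, then read the 3x3 grids off the flat 9-element list row by row.
--     p = list(pairs[:8])
--     p = p + [("?", "?")] * (8 - len(p))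
--     p.insert(4, ("A", "A"))
--     color = [[cc for cc, _ in p[3 * r:3 * r + 3]] for r in range(3)]
--     obj = [[oc for _, oc in p[3 * r:3 * r + 3]] for r in range(3)]
--     return color, obj
-- ===== Notes on version B (the rewrite author's own statement) =====
-- stated objective: simpler
-- what changed: Replaces the precomputed positions table and in-place cell assignments with a flat construction: pad the first 8 pairs to 8, splice the center ('A','A') in at index 4, and slice the 9-element list into rows, unzipping colors and objects.
import Mathlib
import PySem

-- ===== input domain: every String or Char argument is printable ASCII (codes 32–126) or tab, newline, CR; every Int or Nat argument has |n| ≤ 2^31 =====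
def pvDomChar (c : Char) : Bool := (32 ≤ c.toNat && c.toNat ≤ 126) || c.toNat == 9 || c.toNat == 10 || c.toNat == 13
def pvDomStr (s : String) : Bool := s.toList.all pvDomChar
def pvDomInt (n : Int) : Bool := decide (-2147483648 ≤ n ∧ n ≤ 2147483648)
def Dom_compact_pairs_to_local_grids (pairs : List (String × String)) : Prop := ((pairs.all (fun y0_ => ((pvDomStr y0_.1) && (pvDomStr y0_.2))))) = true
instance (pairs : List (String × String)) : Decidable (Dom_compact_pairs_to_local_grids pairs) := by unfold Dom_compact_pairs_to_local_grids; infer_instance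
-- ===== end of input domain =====

-- B rebuilds the grids from a flat padded 9-element list (pad to 8, splice the
-- center, slice into rows) instead of A's positions table with in-place cell writes.


-- ===== PORT A =====
-- color[r][c] = v on a list-of-lists grid
def pvSetCell (g : List (List String)) (r c : Nat) (v : String) : List (List String) :=
  g.modify r (fun row => row.set c v)

def compact_pairs_to_local_grids (pairs : List (String × String)) : List (List String) × List (List String) :=
  let color : List (List String) := [["?", "?", "?"], ["?", "A", "?"], ["?", "?", "?"]]
  let obj   : List (List String) := [["?", "?", "?"], ["?", "A", "?"], ["?", "?", "?"]]
  let positions : List (Nat × Nat) := [(0, 0), (0, 1), (0, 2), (1, 0), (1, 2), (2, 0), (2, 1), (2, 2)]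
  (positions.zip pairs).foldl
    (fun st x =>
      match st, x with
      | (co, ob), ((r, c), (colorChar, objectChar)) =>
        (pvSetCell co r c colorChar, pvSetCell ob r c objectChar))
    (color, obj)

-- ===== PORT B =====
def compact_pairs_to_local_grids_alt (pairs : List (String × String)) : List (List String) × List (List String) :=
  let p := pairs.take 8
  let p := p ++ List.replicate (8 - p.length) ("?", "?")
  let p := p.insertIdx 4 ("A", "A")
  let color := (List.range 3).map (fun r => (PySem.List.slice p (some (3 * (r : Int))) (some (3 * (r : Int) + 3))).map Prod.fst)
  let obj := (List.range 3).map (fun r => (PySem.List.slice p (some (3 * (r : Int))) (some (3 * (r : Int) + 3))).map Prod.snd)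
  (color, obj)

-- ===== PRECONDITION & SPEC =====
def Spec_compact_pairs_to_local_grids (pairs : List (String × String)) (out : List (List String) × List (List String)) : Prop := out = compact_pairs_to_local_grids_alt pairs
instance (pairs : List (String × String)) (out : List (List String) × List (List String)) : Decidable (Spec_compact_pairs_to_local_grids pairs out) := by unfold Spec_compact_pairs_to_local_grids; infer_instance

-- ===== CLAIM (what is proved, stated in full; the proofs are below) =====
def Claim_equal_compact_pairs_to_local_grids : Prop := ∀ (pairs : List (String × String)), Dom_compact_pairs_to_local_grids pairs → Spec_compact_pairs_to_local_grids pairs (compact_pairs_to_local_grids pairs)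

-- ===== LEMMAS AND PROOFS =====

-- ===== VERDICT (by name: the statement is the Claim_ definition above) =====
theorem compact_pairs_to_local_grids_spec : Claim_equal_compact_pairs_to_local_grids := by
  intro pairs _
  unfold Spec_compact_pairs_to_local_grids
  rcases pairs with _ | ⟨p0, _ | ⟨p1, _ | ⟨p2, _ | ⟨p3, _ | ⟨p4, _ | ⟨p5, _ | ⟨p6, _ | ⟨p7, rest⟩⟩⟩⟩⟩⟩⟩⟩ <;>
    rfl
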